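-- pv_equiv track=rewrite | github.com/MiddleBridge/AD_ANALYST.MD_APPLICATION | agents/competitive_intelligence.py | _matched_incumbents
-- ===== SOURCE A (Python) =====
-- def _matched_incumbents(major_incumbents: list[str], names_blob: str) -> list[str]:
--     blob = names_blob.lower()
--     matched: list[str] = []
--     for brand in major_incumbents:
--         b = brand.strip()
--         if len(b) < 2:
--             continue
--         if b.lower() in blob:
--             matched.append(b)
--     return matched
-- ===== SOURCE B (Python) =====
-- def _matched_incumbents(major_incumbents: list[str], names_blob: str) -> list[str]:
--     blob = names_blob.lower()
--     cleaned = [b.strip() for b in major_incumbents]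
--     lengths = dict.fromkeys(len(b) for b in cleaned if 2 <= len(b))
--     subs = set()
--     for L in lengths:
--         for i in range(len(blob) - L + 1):
--             subs.add(blob[i:i + L])
--     return [b for b in cleaned if 2 <= len(b) and b.lower() in subs]
-- ===== Notes on version B (the rewrite author's own statement) =====
-- stated objective: faster
-- what changed: Instead of running a substring search over the blob for every brand, B builds one hash set of all blob substrings whose lengths occur among the stripped brands of length >= 2, then answers each brand by a single set-membership lookup.
import Mathlib
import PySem

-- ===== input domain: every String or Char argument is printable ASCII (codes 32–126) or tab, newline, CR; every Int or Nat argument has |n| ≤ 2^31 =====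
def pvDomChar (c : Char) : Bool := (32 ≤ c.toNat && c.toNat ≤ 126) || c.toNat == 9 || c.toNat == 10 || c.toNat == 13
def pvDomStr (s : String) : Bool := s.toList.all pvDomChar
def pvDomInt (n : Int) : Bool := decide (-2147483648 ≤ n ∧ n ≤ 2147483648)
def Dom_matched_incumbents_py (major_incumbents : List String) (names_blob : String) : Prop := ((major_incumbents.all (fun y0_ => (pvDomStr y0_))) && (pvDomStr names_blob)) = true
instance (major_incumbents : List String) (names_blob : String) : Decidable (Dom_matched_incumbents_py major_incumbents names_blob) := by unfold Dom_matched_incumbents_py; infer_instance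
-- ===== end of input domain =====

-- B replaces the per-brand substring scan of the blob by one precomputed hash set of blob substrings
-- of the relevant lengths, answering each brand by a single set-membership lookup (measured faster in a timing run).


-- ===== PORT A =====
def matched_incumbents_py (major_incumbents : List String) (names_blob : String) : List String :=
  let blob := PySem.Str.lower names_blob
  major_incumbents.foldl (fun matched brand =>
    let b := PySem.Str.strip brand
    if PySem.Str.len b < 2 then matched
    else if PySem.Str.isIn (PySem.Str.lower b) blob then matched ++ [b]
    else matched) []

-- ===== PORT B =====
-- the substring index: every blob slice of each length occurring in `lengths`
def pvSubsIndex (blob : String) (lengths : List Int) : PySem.Set String :=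
  lengths.foldl (fun s L =>
    (PySem.List.pyRange 0 (PySem.Str.len blob - L + 1)).foldl
      (fun s i => PySem.Set.add s (PySem.Str.slice blob (some i) (some (i + L)))) s)
    PySem.Set.empty

def matched_incumbents_py_alt (major_incumbents : List String) (names_blob : String) : List String :=
  let blob := PySem.Str.lower names_blob
  let cleaned := major_incumbents.map PySem.Str.strip
  let lengths := PySem.List.dedup ((cleaned.filter (fun b => decide (2 ≤ PySem.Str.len b))).map PySem.Str.len)
  let subs := pvSubsIndex blob lengths
  cleaned.filter (fun b => decide (2 ≤ PySem.Str.len b) && PySem.Set.contains subs (PySem.Str.lower b))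

-- ===== PRECONDITION & SPEC =====
def Spec_matched_incumbents_py (major_incumbents : List String) (names_blob : String) (out : List String) : Prop := out = matched_incumbents_py_alt major_incumbents names_blob
instance (major_incumbents : List String) (names_blob : String) (out : List String) : Decidable (Spec_matched_incumbents_py major_incumbents names_blob out) := by unfold Spec_matched_incumbents_py; infer_instance

-- ===== CLAIM (what is proved, stated in full; the proofs are below) =====
def Claim_equal_matched_incumbents_py : Prop := ∀ (major_incumbents : List String) (names_blob : String), Dom_matched_incumbents_py major_incumbents names_blob → Spec_matched_incumbents_py major_incumbents names_blob (matched_incumbents_py major_incumbents names_blob)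

-- ===== LEMMAS AND PROOFS =====

-- membership in a fold of Set.add
theorem mem_foldl_set_add {α β : Type} [BEq α] [LawfulBEq α] (h : β → α) (l : List β)
    (s0 : PySem.Set α) (y : α) :
    y ∈ l.foldl (fun s i => PySem.Set.add s (h i)) s0 ↔ y ∈ s0 ∨ ∃ i ∈ l, y = h i := by
  induction l generalizing s0 with
  | nil => simp
  | cons a t ih =>
      simp [ih, PySem.Set.mem_add]
      tauto

-- membership in the substring index
theorem mem_pvSubsIndex_aux (blob : String) (lengths : List Int) (s0 : PySem.Set String) (y : String) :
    y ∈ lengths.foldl (fun s L =>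
      (PySem.List.pyRange 0 (PySem.Str.len blob - L + 1)).foldl
        (fun s i => PySem.Set.add s (PySem.Str.slice blob (some i) (some (i + L)))) s) s0 ↔
      y ∈ s0 ∨ ∃ L ∈ lengths, ∃ i, 0 ≤ i ∧ i < PySem.Str.len blob - L + 1 ∧
        y = PySem.Str.slice blob (some i) (some (i + L)) := by
  induction lengths generalizing s0 with
  | nil => simp
  | cons L t ih =>
      simp only [List.foldl_cons]
      rw [ih]
      rw [mem_foldl_set_add]
      simp [PySem.List.mem_pyRange_one, and_assoc, or_assoc]

theorem mem_pvSubsIndex (blob : String) (lengths : List Int) (y : String) :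
    y ∈ pvSubsIndex blob lengths ↔
      ∃ L ∈ lengths, ∃ i, 0 ≤ i ∧ i < PySem.Str.len blob - L + 1 ∧
        y = PySem.Str.slice blob (some i) (some (i + L)) := by
  unfold pvSubsIndex
  rw [mem_pvSubsIndex_aux]
  simp [PySem.Set.empty]

-- the index answers exactly the substring question, for strings of an indexed length
theorem len_lower (s : String) : PySem.Str.len (PySem.Str.lower s) = PySem.Str.len s := by
  simp [PySem.Str.len_eq, PySem.Str.toList_lower, PySem.Chars.lower]

theorem contains_pvSubsIndex (blob sub : String) (lengths : List Int)
    (hpos : ∀ L ∈ lengths, 2 ≤ L) (hmem : PySem.Str.len sub ∈ lengths) :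
    PySem.Set.contains (pvSubsIndex blob lengths) sub = PySem.Str.isIn sub blob := by
  rw [Bool.eq_iff_iff, PySem.Set.contains_iff, mem_pvSubsIndex]
  have hbridge : PySem.Str.isIn sub blob = PySem.Chars.isIn sub.toList blob.toList := by
    simp
  rw [hbridge, ← PySem.Chars.exists_prefix_drop_iff_isIn]
  constructor
  · rintro ⟨L, hL, i, hi0, _, rfl⟩
    refine ⟨i.toNat, ?_⟩
    have h2 : (2 : Int) ≤ L := hpos L hL
    have : (PySem.Str.slice blob (some i) (some (i + L))).toList
        = ((blob.toList.drop i.toNat).take ((i + L).toNat - i.toNat)) := by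
      rw [PySem.Str.toList_slice]
      exact PySem.List.slice_toNat blob.toList hi0 (by omega)
    rw [this]
    exact List.take_prefix _ _
  · rintro ⟨j, hpre⟩
    have hlen : PySem.Str.len sub = (sub.toList.length : Int) := PySem.Str.len_eq sub
    set ℓ := sub.toList.length with hℓ
    have h2 : (2 : Int) ≤ (ℓ : Int) := by rw [← hlen]; exact hpos _ hmem
    have hle : ℓ ≤ blob.toList.length - j := by
      have := hpre.length_le
      simpa using this
    have hj : j + ℓ ≤ blob.toList.length := by omega
    refine ⟨(ℓ : Int), by rwa [← hlen], (j : Int), by positivity, ?_, ?_⟩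
    · rw [PySem.Str.len_eq]
      omega
    · apply String.toList_inj.mp
      rw [PySem.Str.toList_slice]
      have : PySem.Chars.slice blob.toList (some (j : Int)) (some ((j : Int) + (ℓ : Int)))
          = (blob.toList.drop j).take ℓ := PySem.List.slice_natCast_add blob.toList j ℓ
      rw [this]
      exact (List.prefix_iff_eq_take.mp hpre).symm ▸ rfl

-- A's loop is a filter over the stripped brands
theorem portA_aux (major_incumbents : List String) (blob : String) (acc : List String) :
    major_incumbents.foldl (fun matched brand =>
      if PySem.Str.len (PySem.Str.strip brand) < 2 then matched
      else if PySem.Str.isIn (PySem.Str.lower (PySem.Str.strip brand)) blob then matched ++ [PySem.Str.strip brand]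
      else matched) acc =
    acc ++ (major_incumbents.map PySem.Str.strip).filter
      (fun b => decide (2 ≤ PySem.Str.len b) && PySem.Str.isIn (PySem.Str.lower b) blob) := by
  induction major_incumbents generalizing acc with
  | nil => simp
  | cons a t ih =>
      simp only [List.foldl_cons, List.map_cons, List.filter_cons]
      by_cases h1 : PySem.Str.len (PySem.Str.strip a) < 2
      · rw [if_pos h1, ih,
          show (decide (2 ≤ PySem.Str.len (PySem.Str.strip a)) &&
            PySem.Str.isIn (PySem.Str.lower (PySem.Str.strip a)) blob) = false by
              rw [decide_eq_false (by omega : ¬ 2 ≤ PySem.Str.len (PySem.Str.strip a))]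
              exact Bool.false_and _]
        rw [if_neg (by simp)]
      · have hd : decide (2 ≤ PySem.Str.len (PySem.Str.strip a)) = true :=
          decide_eq_true (by omega)
        rw [if_neg h1]
        by_cases h2 : PySem.Str.isIn (PySem.Str.lower (PySem.Str.strip a)) blob = true
        · rw [if_pos h2, ih,
            show (decide (2 ≤ PySem.Str.len (PySem.Str.strip a)) &&
              PySem.Str.isIn (PySem.Str.lower (PySem.Str.strip a)) blob) = true by
                rw [hd, h2]; rfl]
          rw [if_pos (by simp)]
          simp
        · rw [if_neg h2, ih,
            show (decide (2 ≤ PySem.Str.len (PySem.Str.strip a)) &&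
              PySem.Str.isIn (PySem.Str.lower (PySem.Str.strip a)) blob) = false by
                rw [hd, Bool.true_and]; exact Bool.not_eq_true _ ▸ (by simpa using h2)]
          rw [if_neg (by simp)]

-- ===== VERDICT (by name: the statement is the Claim_ definition above) =====
theorem matched_incumbents_py_spec : Claim_equal_matched_incumbents_py := by
  intro mi nb _
  unfold Spec_matched_incumbents_py matched_incumbents_py matched_incumbents_py_alt
  refine ((portA_aux mi (PySem.Str.lower nb) []).trans (List.nil_append _)).trans ?_
  apply (List.filter_congr ?_).symm
  intro b hb
  by_cases h1 : 2 ≤ PySem.Str.len b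
  · have hpos : ∀ L ∈ PySem.List.dedup (((mi.map PySem.Str.strip).filter
        (fun b => decide (2 ≤ PySem.Str.len b))).map PySem.Str.len), 2 ≤ L := by
      intro L hL
      rw [PySem.List.mem_dedup] at hL
      obtain ⟨c, hc, rfl⟩ := List.mem_map.mp hL
      have := List.of_mem_filter hc
      simpa using this
    have hmem : PySem.Str.len (PySem.Str.lower b) ∈ PySem.List.dedup (((mi.map PySem.Str.strip).filter
        (fun b => decide (2 ≤ PySem.Str.len b))).map PySem.Str.len) := by
      rw [len_lower, PySem.List.mem_dedup]
      exact List.mem_map.mpr ⟨b, List.mem_filter.mpr ⟨hb, by simpa using h1⟩, rfl⟩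
    rw [contains_pvSubsIndex _ _ _ hpos hmem]
  · have h0 : decide (2 ≤ PySem.Str.len b) = false := decide_eq_false h1
    simp only [h0, Bool.false_and]
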